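-- pv_equiv track=rewrite | github.com/Zaynah1999/CFG-homework | homework2/homework4.py | generate_phrase
-- ===== SOURCE A (Python) =====
-- def generate_phrase(characters, phrase):
--     list_ph = list(phrase)
--     list_char = list(characters)
--     if len(list_char) >= len(list_ph):
--         [list_ph.remove(char) for char in list_char if char in list_ph]
--         return len(list_ph) == 0
--     else:
--         return False
-- ===== SOURCE B (Python) =====
-- def generate_phrase(characters, phrase):
--     counts = {}
--     for c in characters:
--         counts[c] = counts.get(c, 0) + 1
--     for c in phrase:
--         n = counts.get(c, 0)
--         if n == 0:
--             return False
--         counts[c] = n - 1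
--     return True
-- ===== Notes on version B (the rewrite author's own statement) =====
-- stated objective: faster
-- what changed: Replaces A's per-character membership-test-and-remove scanning of the phrase list with a single counting dictionary built from characters that each phrase character decrements, with early exit on a missing character.
import Mathlib
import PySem

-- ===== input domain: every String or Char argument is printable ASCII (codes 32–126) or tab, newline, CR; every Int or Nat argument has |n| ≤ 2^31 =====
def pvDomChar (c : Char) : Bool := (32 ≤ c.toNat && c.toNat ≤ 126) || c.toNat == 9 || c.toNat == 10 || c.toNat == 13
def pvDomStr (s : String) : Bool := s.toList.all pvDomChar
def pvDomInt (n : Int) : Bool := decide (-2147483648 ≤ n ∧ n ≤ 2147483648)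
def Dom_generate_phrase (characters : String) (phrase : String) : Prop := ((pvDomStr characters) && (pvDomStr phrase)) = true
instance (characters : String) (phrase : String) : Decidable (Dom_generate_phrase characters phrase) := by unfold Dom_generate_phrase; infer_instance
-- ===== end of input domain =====

-- B replaces A's repeated in/remove scans of the phrase list with one counting dictionary (faster).

-- ===== PORT A =====
def generate_phrase (characters : String) (phrase : String) : Bool :=
  let list_ph := phrase.toList
  let list_char := characters.toList
  if list_char.length ≥ list_ph.length then
    -- [list_ph.remove(char) for char in list_char if char in list_ph]
    let final := list_char.foldl
      (fun ph c => if ph.contains c then (PySem.List.remove? ph c).getD ph else ph) list_ph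
    final.length == 0
  else
    false

-- ===== PORT B =====
-- the second loop of Source B, with its early `return False`
def pvLoopB (d : PySem.Dict Char Int) : List Char → Bool
  | [] => true
  | c :: rest =>
    let n := d.getD c 0
    if n == 0 then false else pvLoopB (d.insert c (n - 1)) rest

def generate_phrase_alt (characters : String) (phrase : String) : Bool :=
  let counts := characters.toList.foldl
    (fun d c => d.insert c (d.getD c 0 + 1)) PySem.Dict.empty
  pvLoopB counts phrase.toList

-- ===== PRECONDITION & SPEC =====
def Spec_generate_phrase (characters : String) (phrase : String) (out : Bool) : Prop := out = generate_phrase_alt characters phrase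
instance (characters : String) (phrase : String) (out : Bool) : Decidable (Spec_generate_phrase characters phrase out) := by unfold Spec_generate_phrase; infer_instance

-- ===== CLAIM (what is proved, stated in full; the proofs are below) =====
def Claim_equal_generate_phrase : Prop := ∀ (characters : String) (phrase : String), Dom_generate_phrase characters phrase → Spec_generate_phrase characters phrase (generate_phrase characters phrase)

-- ===== LEMMAS AND PROOFS =====

-- A's removal fold: counts are truncated subtraction of counts
theorem countA (cs : List Char) : ∀ (ph : List Char) (x : Char),
    (cs.foldl (fun ph c => if ph.contains c then (PySem.List.remove? ph c).getD ph else ph) ph).count x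
      = ph.count x - cs.count x := by
  induction cs with
  | nil => intro ph x; simp
  | cons c cs ih =>
    intro ph x
    simp only [List.foldl_cons]
    by_cases hc : c ∈ ph
    · rw [show (if ph.contains c then (PySem.List.remove? ph c).getD ph else ph) = ph.erase c by
        simp [hc, PySem.List.remove?_eq_some_erase ph c hc]]
      rw [ih]
      by_cases hx : x = c
      · subst hx
        rw [List.count_erase_self, List.count_cons_self]
        omega
      · rw [List.count_erase_of_ne hx, List.count_cons_of_ne (fun h => hx h.symm)]
    · rw [show (if ph.contains c then (PySem.List.remove? ph c).getD ph else ph) = ph by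
        simp [hc]]
      rw [ih]
      by_cases hx : x = c
      · subst hx
        have : ph.count x = 0 := List.count_eq_zero.mpr hc
        omega
      · rw [List.count_cons_of_ne (fun h => hx h.symm)]

-- B's counting fold
theorem countB (cs : List Char) : ∀ (d : PySem.Dict Char Int) (x : Char),
    (cs.foldl (fun d c => d.insert c (d.getD c 0 + 1)) d).getD x 0
      = d.getD x 0 + (cs.count x : Int) := by
  induction cs with
  | nil => intro d x; simp
  | cons c cs ih =>
    intro d x
    simp only [List.foldl_cons]
    rw [ih]
    by_cases hx : x = c
    · subst hx
      rw [PySem.Dict.getD_insert_self, List.count_cons_self]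
      push_cast; ring
    · rw [PySem.Dict.getD_insert_of_ne _ _ _ hx, List.count_cons_of_ne (fun h => hx h.symm)]

-- B's consuming loop succeeds iff every count fits in the dictionary
theorem loopB_iff (ph : List Char) : ∀ (d : PySem.Dict Char Int),
    (∀ x, 0 ≤ d.getD x 0) →
    (pvLoopB d ph = true ↔ ∀ x, (ph.count x : Int) ≤ d.getD x 0) := by
  induction ph with
  | nil =>
    intro d hd
    simp only [pvLoopB, true_iff]
    intro x; simpa using hd x
  | cons c rest ih =>
    intro d hd
    simp only [pvLoopB]
    by_cases h0 : d.getD c 0 == 0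
    · simp only [h0, if_true, Bool.false_eq_true, false_iff]
      intro h
      have hcnt := h c
      rw [List.count_cons_self] at hcnt
      have h0' : d.getD c 0 = 0 := by simpa using h0
      have hle : ((rest.count c : Int) + 1) ≤ 0 := by rw [h0'] at hcnt; exact_mod_cast hcnt
      have := Int.natCast_nonneg (rest.count c)
      omega
    · have h0' : d.getD c 0 ≠ 0 := by simpa using h0
      have hpos : 1 ≤ d.getD c 0 := by have := hd c; omega
      simp only [h0, Bool.false_eq_true, if_false]
      rw [ih (d.insert c (d.getD c 0 - 1)) (by
        intro x
        by_cases hx : x = c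
        · subst hx; rw [PySem.Dict.getD_insert_self]; omega
        · rw [PySem.Dict.getD_insert_of_ne _ _ _ hx]; exact hd x)]
      constructor
      · intro h x
        by_cases hx : x = c
        · subst hx
          have := h x
          rw [PySem.Dict.getD_insert_self] at this
          rw [List.count_cons_self]
          push_cast
          omega
        · have := h x
          rw [PySem.Dict.getD_insert_of_ne _ _ _ hx] at this
          rw [List.count_cons_of_ne (fun h' => hx h'.symm)]
          exact this
      · intro h x
        by_cases hx : x = c
        · subst hx
          have := h x
          rw [List.count_cons_self] at this
          rw [PySem.Dict.getD_insert_self]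
          push_cast at this ⊢
          omega
        · have := h x
          rw [List.count_cons_of_ne (fun h' => hx h'.symm)] at this
          rw [PySem.Dict.getD_insert_of_ne _ _ _ hx]
          exact this

-- the pointwise count condition forces the length guard
theorem len_le_of_counts {ph cs : List Char}
    (h : ∀ x, ph.count x ≤ cs.count x) : ph.length ≤ cs.length := by
  have hle : (ph : Multiset Char) ≤ (cs : Multiset Char) := by
    rw [Multiset.le_iff_count]
    intro a; simpa using h a
  simpa using Multiset.card_le_card hle

theorem emptyGetD (x : Char) : (PySem.Dict.empty : PySem.Dict Char Int).getD x 0 = 0 := rfl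

-- B as the pointwise count comparison
theorem altB (characters phrase : String) :
    generate_phrase_alt characters phrase
      = true ↔ ∀ x, phrase.toList.count x ≤ characters.toList.count x := by
  unfold generate_phrase_alt
  rw [loopB_iff _ _ (by
    intro x
    rw [countB, emptyGetD, zero_add]
    exact Int.natCast_nonneg _)]
  constructor
  · intro h x
    have := h x
    rw [countB, emptyGetD, zero_add] at this
    exact_mod_cast this
  · intro h x
    rw [countB, emptyGetD, zero_add]
    exact_mod_cast h x

-- ===== VERDICT (by name: the statement is the Claim_ definition above) =====
theorem generate_phrase_spec : Claim_equal_generate_phrase := by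
  intro characters phrase _
  unfold Spec_generate_phrase
  unfold generate_phrase
  by_cases hP : ∀ x, phrase.toList.count x ≤ characters.toList.count x
  · have hguard : characters.toList.length ≥ phrase.toList.length := len_le_of_counts hP
    rw [if_pos hguard]
    have hfinal : (characters.toList.foldl
        (fun ph c => if ph.contains c then (PySem.List.remove? ph c).getD ph else ph)
        phrase.toList) = [] := by
      rw [List.eq_nil_iff_forall_not_mem]
      intro x hx
      have hcnt := countA characters.toList phrase.toList x
      have hne : (characters.toList.foldl
        (fun ph c => if ph.contains c then (PySem.List.remove? ph c).getD ph else ph)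
        phrase.toList).count x ≠ 0 := fun h0 => (List.count_eq_zero.mp h0) hx
      have := hP x
      omega
    rw [hfinal, (altB characters phrase).mpr hP]
    rfl
  · have hB : generate_phrase_alt characters phrase = false := by
      cases h : generate_phrase_alt characters phrase with
      | false => rfl
      | true => exact absurd ((altB characters phrase).mp h) hP
    rw [hB]
    by_cases hguard : characters.toList.length ≥ phrase.toList.length
    · rw [if_pos hguard]
      rw [beq_eq_false_iff_ne]
      intro hlen
      rw [List.length_eq_zero_iff] at hlen
      push Not at hP
      obtain ⟨x, hx⟩ := hP
      have hcnt := countA characters.toList phrase.toList x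
      rw [hlen] at hcnt
      simp at hcnt
      omega
    · rw [if_neg hguard]
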